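-- pv_equiv track=rewrite | github.com/giantoak/NavigationalClutter | navigation.py | join_tags
-- ===== SOURCE A (Python) =====
-- def join_tags(a, b):
--     la, lb = len(a), len(b)
--     minlen, maxlen = min(la, lb), max(la, lb)
--
--     longer = a if la > lb else b
--
--     joined = [0]*maxlen
--     for ix in range(1, minlen+1):
--         joined[-ix] = a[-ix] + b[-ix]
--
--     for ix in range(maxlen-minlen):
--         joined[ix] = longer[ix]
--
--     return joined
-- ===== SOURCE B (Python) =====
-- def join_tags(a, b):
--     ra, rb = a[::-1], b[::-1]
--     n = min(len(ra), len(rb))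
--     out = [x + y for x, y in zip(ra, rb)] + ra[n:] + rb[n:]
--     return out[::-1]
-- ===== Notes on version B (the rewrite author's own statement) =====
-- stated objective: simpler
-- what changed: Replaces the preallocated [0]*maxlen buffer filled by two index loops (one with negative indices) by a reverse-align: reverse both lists, zip-add the common part, append the leftover tail, reverse back.
import Mathlib
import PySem

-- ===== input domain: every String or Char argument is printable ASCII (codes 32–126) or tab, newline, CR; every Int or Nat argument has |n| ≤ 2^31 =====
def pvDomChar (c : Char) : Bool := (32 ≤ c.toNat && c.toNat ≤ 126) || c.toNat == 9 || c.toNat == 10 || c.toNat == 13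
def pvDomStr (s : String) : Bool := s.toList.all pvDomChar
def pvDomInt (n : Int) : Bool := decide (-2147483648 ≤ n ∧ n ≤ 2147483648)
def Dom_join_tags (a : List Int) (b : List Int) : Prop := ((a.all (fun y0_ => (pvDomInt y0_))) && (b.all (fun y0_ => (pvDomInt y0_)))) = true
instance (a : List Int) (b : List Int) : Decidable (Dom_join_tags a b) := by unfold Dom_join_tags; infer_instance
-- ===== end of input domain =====

-- B replaces A's preallocated [0]*maxlen buffer filled by two index loops with reverse / zip-add / reverse (objective: simpler).

-- ===== PORT A =====
def join_tags (a : List Int) (b : List Int) : List Int :=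
  let la : Int := a.length
  let lb : Int := b.length
  let minlen : Int := min la lb
  let maxlen : Int := max la lb
  let longer : List Int := if la > lb then a else b
  let joined : List Int := List.replicate maxlen.toNat 0
  let joined := (PySem.List.pyRange 1 (minlen + 1) 1).foldl
      (fun j ix => PySem.List.pySetD j (-ix)
        (PySem.List.pyGetD a (-ix) 0 + PySem.List.pyGetD b (-ix) 0)) joined
  let joined := (PySem.List.pyRange 0 (maxlen - minlen) 1).foldl
      (fun j ix => PySem.List.pySetD j ix (PySem.List.pyGetD longer ix 0)) joined
  joined

-- ===== PORT B =====
def join_tags_alt (a : List Int) (b : List Int) : List Int :=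
  let ra := a.reverse
  let rb := b.reverse
  let n : Nat := min ra.length rb.length
  let out := (ra.zip rb).map (fun p => p.1 + p.2)
      ++ PySem.List.slice ra (some (n : Int)) none
      ++ PySem.List.slice rb (some (n : Int)) none
  out.reverse

-- ===== PRECONDITION & SPEC =====
def Spec_join_tags (a : List Int) (b : List Int) (out : List Int) : Prop := out = join_tags_alt a b
instance (a : List Int) (b : List Int) (out : List Int) : Decidable (Spec_join_tags a b out) := by unfold Spec_join_tags; infer_instance

-- ===== CLAIM (what is proved, stated in full; the proofs are below) =====
def Claim_equal_join_tags : Prop := ∀ (a : List Int) (b : List Int), Dom_join_tags a b → Spec_join_tags a b (join_tags a b)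

-- ===== LEMMAS AND PROOFS =====

-- Python `xs[-k] = v` (1 ≤ k ≤ len(xs)) is a plain set at position len(xs) - k.
theorem pvSetD_neg (xs : List Int) (v : Int) (k : Nat) (h1 : 0 < k) (h2 : k ≤ xs.length) :
    PySem.List.pySetD xs (-(k : Int)) v = xs.set (xs.length - k) v := by
  unfold PySem.List.pySetD PySem.List.pySet? PySem.List.pyIdx?
  rw [if_neg (by omega), if_pos (by omega)]
  simp

-- A's first loop: after ix = 1..k the last k slots hold the aligned sums, the rest are still 0.
theorem pvLoop1 (a b : List Int) (M : Nat) (hM : max a.length b.length ≤ M)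
    (k : Nat) (hk : k ≤ min a.length b.length) :
    (PySem.List.pyRange 1 ((k : Int) + 1) 1).foldl
      (fun j ix => PySem.List.pySetD j (-ix)
        (PySem.List.pyGetD a (-ix) 0 + PySem.List.pyGetD b (-ix) 0))
      (List.replicate M 0)
    = List.replicate (M - k) 0
      ++ List.zipWith (· + ·) (a.drop (a.length - k)) (b.drop (b.length - k)) := by
  induction k with
  | zero => simp
  | succ k ih =>
    have hsplit := PySem.List.pyRange_one_succ_right (show (1:Int) ≤ (k:Int)+1 by omega)
    have hcast : ((((k+1):Nat)):Int) + 1 = ((k:Int)+1) + 1 := by push_cast; ring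
    rw [hcast, hsplit, List.foldl_append, ih (by omega)]
    simp only [List.foldl_cons, List.foldl_nil]
    have hZlen : (List.zipWith (· + ·) (a.drop (a.length - k)) (b.drop (b.length - k))).length = k := by
      simp [List.length_zipWith]; omega
    have hLlen : (List.replicate (M - k) 0 ++
        List.zipWith (· + ·) (a.drop (a.length - k)) (b.drop (b.length - k))).length = M := by
      simp [hZlen]; omega
    have hneg : -((k:Int)+1) = -(((k+1:Nat)):Int) := by push_cast; ring
    rw [hneg, pvSetD_neg _ _ (k+1) (by omega) (by rw [hLlen]; omega), hLlen]
    rw [PySem.List.pyGetD_neg_natCast (hk := by omega) (hk' := by omega),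
        PySem.List.pyGetD_neg_natCast (hk := by omega) (hk' := by omega)]
    have hrep : List.replicate (M - k) (0:Int) = List.replicate (M - (k+1)) 0 ++ [0] := by
      rw [← List.replicate_succ']; congr 1; omega
    rw [hrep, List.append_assoc, List.set_append]
    rw [if_neg (by simp)]
    simp only [List.length_replicate]
    have hidx : M - (k+1) - (M - (k+1)) = 0 := by omega
    simp only [hidx, List.singleton_append, List.set_cons_zero]
    congr 1
    rw [List.drop_eq_getElem_cons (show a.length - (k+1) < a.length by omega),
        List.drop_eq_getElem_cons (show b.length - (k+1) < b.length by omega)]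
    rw [show a.length - (k+1) + 1 = a.length - k by omega,
        show b.length - (k+1) + 1 = b.length - k by omega]
    simp

-- A's second loop: `for ix in range(k): joined[ix] = longer[ix]` overwrites the first k slots.
theorem pvLoop2 (longer : List Int) (k : Nat) :
    ∀ (l0 : List Int), k ≤ l0.length → k ≤ longer.length →
    (PySem.List.pyRange 0 (k : Int) 1).foldl
      (fun j ix => PySem.List.pySetD j ix (PySem.List.pyGetD longer ix 0)) l0
    = longer.take k ++ l0.drop k := by
  induction k with
  | zero => intro l0 _ _; simp
  | succ k ih =>
    intro l0 h1 h2
    have hsplit := PySem.List.pyRange_one_succ_right (show (0:Int) ≤ k from k.cast_nonneg)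
    have hcast : (((k+1:Nat)):Int) = (k:Int)+1 := by push_cast; ring
    rw [hcast, hsplit, List.foldl_append]
    rw [ih l0 (by omega) (by omega)]
    simp only [List.foldl_cons, List.foldl_nil]
    rw [PySem.List.pySetD_natCast, PySem.List.pyGetD_natCast]
    have hg : longer.getD k 0 = longer[k]'(by omega) := List.getD_eq_getElem longer 0 (by omega)
    rw [hg, List.set_append]
    have hlen : (longer.take k).length = k := by simp; omega
    rw [if_neg (by omega), hlen, Nat.sub_self]
    rw [List.drop_eq_getElem_cons (show k < l0.length by omega), List.set_cons_zero]
    rw [List.take_add_one, List.getElem?_eq_getElem (show k < longer.length by omega)]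
    simp only [Option.toList_some, List.append_assoc, List.cons_append, List.nil_append]

-- A's result is: prefix of the longer list, then the zip-sum of the aligned suffixes.
theorem pvA_char (a b : List Int) :
    join_tags a b = (if b.length < a.length then a else b).take
        (max a.length b.length - min a.length b.length)
      ++ List.zipWith (· + ·) (a.drop (a.length - min a.length b.length))
          (b.drop (b.length - min a.length b.length)) := by
  unfold join_tags
  dsimp only
  set la := a.length with hla
  set lb := b.length with hlb
  set n := min la lb with hn
  set M := max la lb with hM
  have e1 : (min (la:Int) (lb:Int)) = ((n:Nat):Int) := by rw [hn]; push_cast; rfl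
  have e2 : (max (la:Int) (lb:Int)) = ((M:Nat):Int) := by rw [hM]; push_cast; rfl
  have e3 : ((M:Nat):Int).toNat = M := Int.toNat_natCast M
  have e4 : ((M:Nat):Int) - ((n:Nat):Int) = (((M - n : Nat)):Int) := by
    have : n ≤ M := min_le_max.trans_eq rfl
    omega
  rw [e1, e2, e3, e4]
  rw [pvLoop1 a b M (le_refl _) n (le_refl _)]
  have hZlen : (List.zipWith (· + ·) (a.drop (la - n)) (b.drop (lb - n))).length = n := by
    simp [List.length_zipWith]; omega
  have hlonglen : ((if (la:Int) < (lb:Int) then b else a).length) = M ∨ True := Or.inr trivial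
  rw [pvLoop2 _ (M - n) _ (by simp)
      (by split <;> rename_i h <;> simp <;> omega)]
  have hgt : ((la:Int) > (lb:Int)) = (lb < la) := by simp
  congr 1
  · congr 1
    split <;> rename_i h <;> split <;> rename_i h2 <;> first | rfl | (exfalso; omega)
  · rw [List.drop_left' (by simp)]

-- B computes the same prefix-plus-aligned-sum decomposition.
theorem pvB_char (a b : List Int) :
    join_tags_alt a b = (if b.length < a.length then a else b).take
        (max a.length b.length - min a.length b.length)
      ++ List.zipWith (· + ·) (a.drop (a.length - min a.length b.length))
          (b.drop (b.length - min a.length b.length)) := by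
  unfold join_tags_alt
  dsimp only
  set la := a.length with hla
  set lb := b.length with hlb
  have hn : min a.reverse.length b.reverse.length = min la lb := by simp; rfl
  rw [hn]
  set n := min la lb with hdefn
  rw [PySem.List.slice_from_natCast, PySem.List.slice_from_natCast]
  rw [show (a.reverse.zip b.reverse).map (fun p => p.1 + p.2)
        = List.zipWith (· + ·) a.reverse b.reverse by simp [List.zip]]
  rw [List.zipWith_eq_zipWith_take_min]
  rw [show min a.reverse.length b.reverse.length = n from hn]
  rw [List.take_reverse, List.take_reverse,
      ← List.reverse_zipWith (by simp; omega),
      List.drop_reverse, List.drop_reverse]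
  rw [List.reverse_append, List.reverse_append]
  simp only [List.reverse_reverse]
  rcases lt_or_ge lb la with h | h
  · rw [if_pos h, show max la lb - n = la - n by omega, show lb - n = 0 by omega]
    simp
    rfl
  · rw [if_neg (by omega), show max la lb - n = lb - n by omega, show la - n = 0 by omega]
    simp
    rfl

-- ===== VERDICT (by name: the statement is the Claim_ definition above) =====
theorem join_tags_spec : Claim_equal_join_tags := by
  intro a b _
  unfold Spec_join_tags
  rw [pvA_char, pvB_char]
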